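-- pv_equiv track=rewrite | github.com/expanse-framework/expanse | src/expanse/openapi/analyzers/docstring_parser.py | _split_numpy_sections
-- ===== SOURCE A (Python) =====
-- def _split_numpy_sections(docstring: str) -> dict[str, str]:
--     """Split NumPy-style docstring into sections."""
--     sections = {"summary": ""}
--     lines = docstring.split("\n")
--     current_section = "summary"
--     current_content = []
--
--     for i, line in enumerate(lines):
--         stripped = line.strip()
--
--         # Check if this line is a section header
--         if (
--             stripped
--             and i + 1 < len(lines)
--             and lines[i + 1].strip()
--             and all(c == "-" for c in lines[i + 1].strip())
--         ):
--             # Save previous section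
--             if current_content:
--                 sections[current_section] = "\n".join(current_content)
--
--             # Start new section
--             current_section = stripped.lower()
--             current_content = []
--             continue
--
--         # Skip underline
--         if stripped and all(c == "-" for c in stripped):
--             continue
--
--         current_content.append(line)
--
--     # Save final section
--     if current_content:
--         sections[current_section] = "\n".join(current_content)
--
--     return sections
-- ===== SOURCE B (Python) =====
-- def _split_numpy_sections(docstring: str) -> dict[str, str]:
--     """Split NumPy-style docstring into sections (two-phase: locate headers, then partition)."""
--
--     def _dashes(s: str) -> bool:
--         t = s.strip()
--         return bool(t) and all(c == "-" for c in t)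
--
--     lines = docstring.split("\n")
--     headers = [i for i, (cur, nxt) in enumerate(zip(lines, lines[1:]))
--                if cur.strip() and _dashes(nxt)]
--     sections = {"summary": ""}
--     name, start = "summary", 0
--     for h in headers + [len(lines)]:
--         body = [ln for ln in lines[start:h] if not _dashes(ln)]
--         if body:
--             sections[name] = "\n".join(body)
--         if h < len(lines):
--             name, start = lines[h].strip().lower(), h + 1
--     return sections
-- ===== Notes on version B (the rewrite author's own statement) =====
-- stated objective: alternative
-- what changed: A is a single stateful scan that accumulates the current section's lines as it goes; B works in two phases: first it scans consecutive line pairs to collect the list of header indices, then it partitions the line list into slices at those indices and builds each section body from its slice.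
import Mathlib
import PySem

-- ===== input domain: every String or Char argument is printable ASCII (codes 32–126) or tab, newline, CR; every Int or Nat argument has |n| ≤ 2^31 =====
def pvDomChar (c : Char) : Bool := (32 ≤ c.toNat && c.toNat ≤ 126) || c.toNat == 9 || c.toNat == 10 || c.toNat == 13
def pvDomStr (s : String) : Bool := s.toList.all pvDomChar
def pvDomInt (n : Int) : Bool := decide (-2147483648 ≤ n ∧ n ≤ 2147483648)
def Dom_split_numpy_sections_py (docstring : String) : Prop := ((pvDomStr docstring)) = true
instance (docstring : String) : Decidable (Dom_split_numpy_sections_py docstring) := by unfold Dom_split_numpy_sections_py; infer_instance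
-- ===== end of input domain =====

-- B replaces A's single stateful scan with a two-phase decomposition (collect header indices,
-- then partition the lines into slices); objective: alternative (same O(n) cost).

-- ===== PORT A =====
-- A's `all(c == "-" for c in t)` test on an (already stripped) string, with the truthiness guard
def pvDashA (t : String) : Bool := !(t == "") && t.toList.all (fun c => c == '-')

-- `if current_content: sections[current_section] = "\n".join(current_content)`
def pvSaveA (d : PySem.Dict String String) (cur : String) (content : List String) :
    PySem.Dict String String :=
  if content ≠ [] then d.insert cur (PySem.Str.join "\n" content) else d

-- the `for i, line in enumerate(lines)` loop; `i + 1 < len(lines) and lines[i+1]…` is the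
-- lookahead at the head of `rest` (exact: lines[i+1] exists iff rest is non-empty); the
-- `[]` case is the `# Save final section` code after the loop
def pvLoopA (d : PySem.Dict String String) (cur : String) (content : List String) :
    List String → PySem.Dict String String
  | [] => pvSaveA d cur content
  | line :: rest =>
      let stripped := PySem.Str.strip line
      if (!(stripped == "") && (match rest with
            | nxt :: _ => pvDashA (PySem.Str.strip nxt)
            | [] => false)) then
        pvLoopA (pvSaveA d cur content) (PySem.Str.lower stripped) [] rest
      else if pvDashA stripped then
        pvLoopA d cur content rest
      else
        pvLoopA d cur (content ++ [line]) rest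

def split_numpy_sections_py (docstring : String) : List (String × String) :=
  let lines := (PySem.Str.split? docstring "\n").getD []   -- sep "\n" ≠ "", so split? is some
  (pvLoopA (PySem.Dict.ofList [("summary", "")]) "summary" [] lines).items

-- ===== PORT B =====
-- B's helper `_dashes(s)`: strip, then non-empty and all dashes
def pvDashesB (s : String) : Bool :=
  let t := PySem.Str.strip s
  !(t == "") && t.toList.all (fun c => c == '-')

-- `[i for i, (cur, nxt) in enumerate(zip(lines, lines[1:])) if cur.strip() and _dashes(nxt)]`
def pvHeadersB (lines : List String) : List Int :=
  (PySem.List.enumerate (lines.zip (PySem.List.slice lines (some 1) none))).filterMap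
    (fun p => if !(PySem.Str.strip p.2.1 == "") && pvDashesB p.2.2 then some p.1 else none)

-- one iteration of B's `for h in headers + [len(lines)]` loop; state = (sections, name, start);
-- lines[h] is in range whenever the guard `h < len(lines)` holds, ported with pyGetD
def pvStepB (lines : List String) (st : PySem.Dict String String × String × Int) (h : Int) :
    PySem.Dict String String × String × Int :=
  let body := (PySem.List.slice lines (some st.2.2) (some h)).filter (fun ln => !pvDashesB ln)
  let secs := if body ≠ [] then st.1.insert st.2.1 (PySem.Str.join "\n" body) else st.1
  if h < PySem.List.len lines then
    (secs, PySem.Str.lower (PySem.Str.strip (PySem.List.pyGetD lines h "")), h + 1)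
  else
    (secs, st.2.1, st.2.2)

def split_numpy_sections_py_alt (docstring : String) : List (String × String) :=
  let lines := (PySem.Str.split? docstring "\n").getD []
  let headers := pvHeadersB lines
  (List.foldl (pvStepB lines) (PySem.Dict.ofList [("summary", "")], "summary", 0)
    (headers ++ [PySem.List.len lines])).1.items

-- ===== PRECONDITION & SPEC =====
def Spec_split_numpy_sections_py (docstring : String) (out : List (String × String)) : Prop := out = split_numpy_sections_py_alt docstring
instance (docstring : String) (out : List (String × String)) : Decidable (Spec_split_numpy_sections_py docstring out) := by unfold Spec_split_numpy_sections_py; infer_instance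

-- ===== CLAIM (what is proved, stated in full; the proofs are below) =====
def Claim_equal_split_numpy_sections_py : Prop := ∀ (docstring : String), Dom_split_numpy_sections_py docstring → Spec_split_numpy_sections_py docstring (split_numpy_sections_py docstring)

-- ===== LEMMAS AND PROOFS =====

-- header test at the head of a suffix: strip of the line is non-empty, next line is all dashes
def pvHdr (l : String) (rest : List String) : Bool :=
  !(PySem.Str.strip l == "") && (match rest with
    | nxt :: _ => pvDashA (PySem.Str.strip nxt)
    | [] => false)

-- header indices of a suffix, as naturals (proof-side mirror of pvHeadersB)
def pvHeadersN : List String → List Nat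
  | [] => []
  | l :: rest => (if pvHdr l rest then [0] else []) ++ (pvHeadersN rest).map (· + 1)

lemma pvHeadersN_head_lt : ∀ (ls : List String) (k : Nat) (hs : List Nat),
    pvHeadersN ls = k :: hs → k + 1 < ls.length := by
  intro ls
  induction ls with
  | nil => intro k hs h; simp [pvHeadersN] at h
  | cons l rest ih =>
      intro k hs h
      cases hh : pvHdr l rest with
      | true =>
          have hun : pvHeadersN (l :: rest) = 0 :: (pvHeadersN rest).map (· + 1) := by
            simp [pvHeadersN, hh]
          rw [hun] at h
          injection h with e1 e2
          cases rest with
          | nil => simp [pvHdr] at hh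
          | cons r rs => simp only [List.length_cons]; omega
      | false =>
          have hun : pvHeadersN (l :: rest) = (pvHeadersN rest).map (· + 1) := by
            simp [pvHeadersN, hh]
          rw [hun] at h
          cases hrec : pvHeadersN rest with
          | nil => rw [hrec] at h; simp at h
          | cons k' hs' =>
              rw [hrec] at h
              simp only [List.map_cons] at h
              injection h with e1 e2
              have := ih k' hs' hrec
              simp only [List.length_cons]
              omega

lemma pvHeadersN_tail : ∀ (ls : List String) (k : Nat) (hs : List Nat),
    pvHeadersN ls = k :: hs → hs = (pvHeadersN (ls.drop (k+1))).map (· + (k+1)) := by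
  intro ls
  induction ls with
  | nil => intro k hs h; simp [pvHeadersN] at h
  | cons l rest ih =>
      intro k hs h
      cases hh : pvHdr l rest with
      | true =>
          have hun : pvHeadersN (l :: rest) = 0 :: (pvHeadersN rest).map (· + 1) := by
            simp [pvHeadersN, hh]
          rw [hun] at h
          injection h with e1 e2
          subst e1
          rw [← e2]
          simp
      | false =>
          have hun : pvHeadersN (l :: rest) = (pvHeadersN rest).map (· + 1) := by
            simp [pvHeadersN, hh]
          rw [hun] at h
          cases hrec : pvHeadersN rest with
          | nil => rw [hrec] at h; simp at h
          | cons k' hs' =>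
              rw [hrec] at h
              simp only [List.map_cons] at h
              injection h with e1 e2
              have htl := ih k' hs' hrec
              subst e1
              rw [← e2, htl]
              rw [List.drop_succ_cons, List.map_map]
              apply List.map_congr_left
              intro a _
              show (a + (k' + 1)) + 1 = a + (k' + 1 + 1)
              omega

-- segment-recursive middle form: cut at the first header, save, recurse on the rest
def pvM (d : PySem.Dict String String) (cur : String) (content : List String)
    (ls : List String) : PySem.Dict String String :=
  match hh : pvHeadersN ls with
  | [] => pvSaveA d cur (content ++ ls.filter (fun ln => !pvDashesB ln))
  | k :: _ =>
      pvM (pvSaveA d cur (content ++ (ls.take k).filter (fun ln => !pvDashesB ln)))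
          (PySem.Str.lower (PySem.Str.strip (ls.getD k ""))) [] (ls.drop (k+1))
termination_by ls.length
decreasing_by
  have h := pvHeadersN_head_lt ls k _ hh
  simp only [List.length_drop]
  omega

-- absorbing one non-header line into pvM's pending content
lemma pvM_cons (d : PySem.Dict String String) (cur : String) (content : List String)
    (l : String) (rest : List String) (h1 : pvHdr l rest = false) :
    pvM d cur content (l :: rest)
      = pvM d cur (content ++ if pvDashesB l then [] else [l]) rest := by
  have hcons : pvHeadersN (l :: rest) = (pvHeadersN rest).map (· + 1) := by
    simp [pvHeadersN, h1]
  rw [pvM]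
  conv_rhs => rw [pvM]
  split
  · rename_i heq1
    split
    · rename_i heq2
      by_cases hdl : pvDashesB l <;> simp [hdl]
    · rename_i k2 tl2 heq2
      rw [heq2] at hcons
      rw [hcons] at heq1
      simp at heq1
  · rename_i k1 tl1 heq1
    split
    · rename_i heq2
      rw [heq2] at hcons
      simp only [List.map_nil] at hcons
      rw [hcons] at heq1
      simp at heq1
    · rename_i k2 tl2 heq2
      rw [hcons, heq2] at heq1
      simp only [List.map_cons] at heq1
      injection heq1 with e1 e2
      subst e1
      subst e2
      by_cases hdl : pvDashesB l <;>
        simp [hdl, List.take_succ_cons, List.drop_succ_cons]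

lemma pvLoopA_eq_pvM : ∀ (ls : List String) (d : PySem.Dict String String)
    (cur : String) (content : List String),
    pvLoopA d cur content ls = pvM d cur content ls := by
  intro ls
  induction ls with
  | nil =>
      intro d cur content
      rw [pvM]
      split
      · rename_i heq
        simp [pvLoopA]
      · rename_i k tl heq
        simp [pvHeadersN] at heq
  | cons l rest ih =>
      intro d cur content
      cases rest with
      | nil =>
          have hh : pvHdr l [] = false := by simp [pvHdr]
          cases hd : pvDashA (PySem.Str.strip l) with
          | true =>
              rw [pvM_cons d cur content l [] hh, ← ih]
              have hdb : pvDashesB l = true := hd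
              simp [pvLoopA, hd, hdb]
          | false =>
              rw [pvM_cons d cur content l [] hh, ← ih]
              have hdb : pvDashesB l = false := hd
              simp [pvLoopA, hd, hdb]
      | cons nxt rs =>
          cases hh : pvHdr l (nxt :: rs) with
          | true =>
              have hc : (!(PySem.Str.strip l == "") && pvDashA (PySem.Str.strip nxt)) = true := hh
              conv_rhs => rw [pvM]
              split
              · rename_i heq
                simp [pvHeadersN, hh] at heq
              · rename_i k tl heq
                have hun : pvHeadersN (l :: nxt :: rs)
                    = 0 :: (pvHeadersN (nxt :: rs)).map (· + 1) := by
                  simp [pvHeadersN, hh]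
                rw [hun] at heq
                injection heq with e1 e2
                subst e1
                simp only [List.take_zero, List.filter_nil, List.append_nil,
                  List.getD_cons_zero, Nat.zero_add, List.drop_one, List.tail_cons]
                rw [← ih]
                simp [pvLoopA, hc]
          | false =>
              have hc : (!(PySem.Str.strip l == "") && pvDashA (PySem.Str.strip nxt)) = false := hh
              cases hd : pvDashA (PySem.Str.strip l) with
              | true =>
                  rw [pvM_cons d cur content l (nxt :: rs) hh, ← ih]
                  have hdb : pvDashesB l = true := hd
                  simp [pvLoopA, hc, hd, hdb]
              | false =>
                  rw [pvM_cons d cur content l (nxt :: rs) hh, ← ih]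
                  have hdb : pvDashesB l = false := hd
                  simp [pvLoopA, hc, hd, hdb]

lemma pvEnumShiftBase {α : Type} : ∀ (ps : List α) (t s : Int),
    PySem.List.enumerate ps (t + s) = (PySem.List.enumerate ps t).map (fun q => (q.1 + s, q.2)) := by
  intro ps
  induction ps with
  | nil => intro t s; simp [PySem.List.enumerate_nil]
  | cons p ps ih =>
      intro t s
      rw [PySem.List.enumerate_cons, PySem.List.enumerate_cons, List.map_cons]
      rw [show t + s + 1 = (t + 1) + s from by ring, ih (t + 1) s]

lemma pvEnumShift (ps : List (String × String)) (s : Int) :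
    (PySem.List.enumerate ps s).filterMap
        (fun p => if !(PySem.Str.strip p.2.1 == "") && pvDashesB p.2.2 then some p.1 else none)
      = ((PySem.List.enumerate ps 0).filterMap
          (fun p => if !(PySem.Str.strip p.2.1 == "") && pvDashesB p.2.2 then some p.1 else none)).map
          (· + s) := by
  have he : PySem.List.enumerate ps s
      = (PySem.List.enumerate ps 0).map (fun q => (q.1 + s, q.2)) := by
    simpa using pvEnumShiftBase ps 0 s
  rw [he, List.filterMap_map, List.map_filterMap]
  congr 1
  funext a
  by_cases h : (!(PySem.Str.strip a.2.1 == "") && pvDashesB a.2.2) = true <;>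
    simp [h, Function.comp]

lemma pvHeadersB_cons (l r : String) (rs : List String) :
    pvHeadersB (l :: r :: rs)
      = (if !(PySem.Str.strip l == "") && pvDashesB r then [(0:Int)] else [])
          ++ (pvHeadersB (r :: rs)).map (· + 1) := by
  have hz : (l :: r :: rs).zip (PySem.List.slice (l :: r :: rs) (some 1) none)
      = (l, r) :: ((r :: rs).zip (PySem.List.slice (r :: rs) (some 1) none)) := by
    simp [PySem.List.slice_from_one]
  simp only [pvHeadersB, hz, PySem.List.enumerate_cons, List.filterMap_cons]
  rw [show (0:Int) + 1 = 1 from by norm_num]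
  rw [pvEnumShift]
  cases hc : (!(PySem.Str.strip l == "") && pvDashesB r) <;> simp

lemma pvHeadersB_eq : ∀ ls : List String,
    pvHeadersB ls = (pvHeadersN ls).map (fun k : Nat => (k : Int)) := by
  intro ls
  induction ls with
  | nil => simp [pvHeadersB, pvHeadersN, PySem.List.enumerate_nil]
  | cons l rest ih =>
      cases rest with
      | nil =>
          simp [pvHeadersB, pvHeadersN, pvHdr, PySem.List.slice_from_one,
            PySem.List.enumerate_nil]
      | cons r rs =>
          rw [pvHeadersB_cons, ih]
          have hun : pvHeadersN (l :: r :: rs)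
              = (if pvHdr l (r :: rs) then [0] else []) ++ (pvHeadersN (r :: rs)).map (· + 1) := by
            simp [pvHeadersN]
          rw [hun]
          have hp : pvHdr l (r :: rs) = (!(PySem.Str.strip l == "") && pvDashesB r) := rfl
          rw [hp]
          cases hc : (!(PySem.Str.strip l == "") && pvDashesB r) with
          | true => simp
          | false => simp

lemma pvSL : ∀ (cuts : List Nat), ∀ (ls : List String) (a s : Nat)
    (d : PySem.Dict String String) (name : String), a ≤ ls.length →
    List.foldl (pvStepB ls) (d, name, ((s + a : Nat) : Int))
        (cuts.map (fun c : Nat => ((c + a : Nat) : Int)))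
      = (fun st : PySem.Dict String String × String × Int => (st.1, st.2.1, st.2.2 + (a : Int)))
          (List.foldl (pvStepB (ls.drop a)) (d, name, (s : Int))
            (cuts.map (fun c : Nat => (c : Int)))) := by
  intro cuts
  induction cuts with
  | nil =>
      intro ls a s d name ha
      simp [Nat.cast_add]
  | cons c cuts ih =>
      intro ls a s d name ha
      simp only [List.map_cons, List.foldl_cons]
      have hbody : PySem.List.slice ls (some ((s + a : Nat) : Int)) (some ((c + a : Nat) : Int))
          = PySem.List.slice (ls.drop a) (some ((s : Nat) : Int)) (some ((c : Nat) : Int)) := by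
        rw [PySem.List.slice_natCast, PySem.List.slice_natCast, List.drop_drop,
          Nat.add_comm a s]
        congr 1
        omega
      by_cases hg : c + a < ls.length
      · have hg1 : ((c + a : Nat) : Int) < PySem.List.len ls := by
          rw [PySem.List.len_eq]; exact_mod_cast hg
        have hg2 : ((c : Nat) : Int) < PySem.List.len (ls.drop a) := by
          rw [PySem.List.len_eq]; simp only [List.length_drop]; omega
        have hget : PySem.List.pyGetD ls ((c + a : Nat) : Int) ""
            = PySem.List.pyGetD (ls.drop a) ((c : Nat) : Int) "" := by
          rw [PySem.List.pyGetD_natCast, PySem.List.pyGetD_natCast]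
          simp [List.getD_eq_getElem?_getD, List.getElem?_drop, Nat.add_comm a c]
        have hL : pvStepB ls (d, name, ((s + a : Nat) : Int)) ((c + a : Nat) : Int)
            = (if ((PySem.List.slice (ls.drop a) (some ((s : Nat) : Int)) (some ((c : Nat) : Int))).filter
                    (fun ln => !pvDashesB ln)) ≠ [] then
                  d.insert name (PySem.Str.join "\n"
                    ((PySem.List.slice (ls.drop a) (some ((s : Nat) : Int)) (some ((c : Nat) : Int))).filter
                      (fun ln => !pvDashesB ln)))
                else d,
               PySem.Str.lower (PySem.Str.strip (PySem.List.pyGetD (ls.drop a) ((c : Nat) : Int) "")),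
               ((c + a : Nat) : Int) + 1) := by
          simp only [pvStepB]
          rw [hbody, hget, if_pos hg1]
        have hR : pvStepB (ls.drop a) (d, name, ((s : Nat) : Int)) ((c : Nat) : Int)
            = (if ((PySem.List.slice (ls.drop a) (some ((s : Nat) : Int)) (some ((c : Nat) : Int))).filter
                    (fun ln => !pvDashesB ln)) ≠ [] then
                  d.insert name (PySem.Str.join "\n"
                    ((PySem.List.slice (ls.drop a) (some ((s : Nat) : Int)) (some ((c : Nat) : Int))).filter
                      (fun ln => !pvDashesB ln)))
                else d,
               PySem.Str.lower (PySem.Str.strip (PySem.List.pyGetD (ls.drop a) ((c : Nat) : Int) "")),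
               ((c : Nat) : Int) + 1) := by
          simp only [pvStepB]
          rw [if_pos hg2]
        rw [hL, hR]
        rw [show ((c + a : Nat) : Int) + 1 = (((c + 1) + a : Nat) : Int) from by omega,
            show ((c : Nat) : Int) + 1 = (((c + 1 : Nat)) : Int) from by omega]
        exact ih ls a (c + 1) _ _ ha
      · have hg1 : ¬ ((c + a : Nat) : Int) < PySem.List.len ls := by
          rw [PySem.List.len_eq]; exact_mod_cast hg
        have hg2 : ¬ ((c : Nat) : Int) < PySem.List.len (ls.drop a) := by
          rw [PySem.List.len_eq]; simp only [List.length_drop]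
          intro hcon
          have : c < ls.length - a := by exact_mod_cast hcon
          omega
        have hL : pvStepB ls (d, name, ((s + a : Nat) : Int)) ((c + a : Nat) : Int)
            = (if ((PySem.List.slice (ls.drop a) (some ((s : Nat) : Int)) (some ((c : Nat) : Int))).filter
                    (fun ln => !pvDashesB ln)) ≠ [] then
                  d.insert name (PySem.Str.join "\n"
                    ((PySem.List.slice (ls.drop a) (some ((s : Nat) : Int)) (some ((c : Nat) : Int))).filter
                      (fun ln => !pvDashesB ln)))
                else d,
               name, ((s + a : Nat) : Int)) := by
          simp only [pvStepB]
          rw [hbody, if_neg hg1]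
        have hR : pvStepB (ls.drop a) (d, name, ((s : Nat) : Int)) ((c : Nat) : Int)
            = (if ((PySem.List.slice (ls.drop a) (some ((s : Nat) : Int)) (some ((c : Nat) : Int))).filter
                    (fun ln => !pvDashesB ln)) ≠ [] then
                  d.insert name (PySem.Str.join "\n"
                    ((PySem.List.slice (ls.drop a) (some ((s : Nat) : Int)) (some ((c : Nat) : Int))).filter
                      (fun ln => !pvDashesB ln)))
                else d,
               name, ((s : Nat) : Int)) := by
          simp only [pvStepB]
          rw [if_neg hg2]
        rw [hL, hR]
        exact ih ls a s _ _ ha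

lemma pvFoldB_nilHeaders (ls : List String) (hh : pvHeadersN ls = [])
    (d : PySem.Dict String String) (name : String) :
    (List.foldl (pvStepB ls) (d, name, ((0 : Nat) : Int))
        ((pvHeadersN ls ++ [ls.length]).map (fun c : Nat => (c : Int)))).1
      = pvM d name [] ls := by
  rw [pvM]
  split
  · rename_i heq
    rw [hh]
    simp only [List.nil_append, List.map_cons, List.map_nil, List.foldl_cons, List.foldl_nil]
    have hstep : pvStepB ls (d, name, ((0 : Nat) : Int)) ((ls.length : Nat) : Int)
        = (pvSaveA d name (ls.filter (fun ln => !pvDashesB ln)), name, ((0 : Nat) : Int)) := by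
      simp only [pvStepB]
      rw [PySem.List.slice_natCast]
      rw [if_neg (by rw [PySem.List.len_eq]; omega : ¬ ((ls.length : Nat) : Int) < PySem.List.len ls)]
      simp [pvSaveA]
    rw [hstep]
  · rename_i k tl heq
    rw [hh] at heq
    simp at heq

lemma pvFoldB_eq_pvM : ∀ (n : Nat) (ls : List String), ls.length ≤ n →
    ∀ (d : PySem.Dict String String) (name : String),
    (List.foldl (pvStepB ls) (d, name, ((0 : Nat) : Int))
        ((pvHeadersN ls ++ [ls.length]).map (fun c : Nat => (c : Int)))).1
      = pvM d name [] ls := by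
  intro n
  induction n with
  | zero =>
      intro ls hlen d name
      cases ls with
      | nil => exact pvFoldB_nilHeaders [] rfl d name
      | cons x xs => simp at hlen
  | succ n ih =>
      intro ls hlen d name
      cases hh : pvHeadersN ls with
      | nil => simpa [hh] using pvFoldB_nilHeaders ls hh d name
      | cons k hs =>
          have hklt := pvHeadersN_head_lt ls k hs hh
          have htail := pvHeadersN_tail ls k hs hh
          rw [pvM]
          split
          · rename_i heq
            rw [hh] at heq
            simp at heq
          · rename_i k' tl' heq
            rw [hh] at heq
            injection heq with e1 e2
            subst e1
            subst e2
            simp only [List.cons_append, List.map_cons, List.foldl_cons]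
            have hg : ((k : Nat) : Int) < PySem.List.len ls := by
              rw [PySem.List.len_eq]
              exact_mod_cast (by omega : k < ls.length)
            have hstep : pvStepB ls (d, name, ((0 : Nat) : Int)) ((k : Nat) : Int)
                = (pvSaveA d name ((ls.take k).filter (fun ln => !pvDashesB ln)),
                   PySem.Str.lower (PySem.Str.strip (ls.getD k "")), ((k : Nat) : Int) + 1) := by
              simp only [pvStepB]
              rw [PySem.List.slice_natCast, if_pos hg, PySem.List.pyGetD_natCast]
              simp [pvSaveA]
            rw [hstep]
            have hlen2 : ls.length = (ls.drop (k+1)).length + (k+1) := by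
              simp only [List.length_drop]
              omega
            have hcuts : (hs ++ [ls.length]).map (fun c : Nat => (c : Int))
                = ((pvHeadersN (ls.drop (k+1)) ++ [(ls.drop (k+1)).length]).map
                    (fun c : Nat => ((c + (k+1) : Nat) : Int))) := by
              rw [htail]
              conv_lhs => rw [hlen2]
              simp only [List.map_append, List.map_map, List.map_cons, List.map_nil]
              rfl
            rw [hcuts]
            rw [show ((k : Nat) : Int) + 1 = ((0 + (k+1) : Nat) : Int) from by omega]
            rw [pvSL (pvHeadersN (ls.drop (k+1)) ++ [(ls.drop (k+1)).length]) ls (k+1) 0 _ _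
              (by omega)]
            have hih := ih (ls.drop (k+1)) (by simp only [List.length_drop]; omega)
              (pvSaveA d name ((ls.take k).filter (fun ln => !pvDashesB ln)))
              (PySem.Str.lower (PySem.Str.strip (ls.getD k "")))
            simpa using hih

-- ===== VERDICT (by name: the statement is the Claim_ definition above) =====
theorem split_numpy_sections_py_spec : Claim_equal_split_numpy_sections_py := by
  intro docstring _
  unfold Spec_split_numpy_sections_py
  simp only [split_numpy_sections_py, split_numpy_sections_py_alt]
  set ls := (PySem.Str.split? docstring "\n").getD [] with hls
  have h1 : pvLoopA (PySem.Dict.ofList [("summary", "")]) "summary" [] ls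
      = pvM (PySem.Dict.ofList [("summary", "")]) "summary" [] ls :=
    pvLoopA_eq_pvM ls _ _ _
  have h2 : (List.foldl (pvStepB ls) (PySem.Dict.ofList [("summary", "")], "summary", (0 : Int))
      (pvHeadersB ls ++ [PySem.List.len ls])).1
      = pvM (PySem.Dict.ofList [("summary", "")]) "summary" [] ls := by
    have hc : pvHeadersB ls ++ [PySem.List.len ls]
        = (pvHeadersN ls ++ [ls.length]).map (fun c : Nat => (c : Int)) := by
      rw [pvHeadersB_eq, PySem.List.len_eq]
      simp
    rw [hc, show (0 : Int) = ((0 : Nat) : Int) from by simp]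
    exact pvFoldB_eq_pvM ls.length ls le_rfl _ _
  rw [h1, h2]
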